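-- pv_equiv track=rewrite | github.com/pmaupin/playtag | tools/bsdl/makeindex.py | union_x
-- ===== SOURCE A (Python) =====
-- def union_x(s):
--     s = list(s)
--     result = s.pop()
--     while s:
--         a = s.pop()
--         assert len(a) == len(result)
--         result = ''.join(a == b and a or 'x' for a,b in zip(a,result))
--     return result
-- ===== SOURCE B (Python) =====
-- def union_x(s):
--     s = list(s)
--     last = s.pop()          # IndexError on empty input, like the original
--     n = len(last)
--     for t in s:
--         assert len(t) == n  # AssertionError on length mismatch, like the original
--     cols = []
--     for i in range(n):
--         c = last[i]
--         for t in s: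
--             if t[i] != c:
--                 c = 'x'
--                 break
--         cols.append(c)
--     return ''.join(cols)
-- ===== Notes on version B (the rewrite author's own statement) =====
-- stated objective: alternative
-- what changed: Column-major construction: for each character position scan all strings once (with early break on first mismatch), instead of row-major repeated pairwise folds that allocate a fresh intermediate string per input string.
import Mathlib
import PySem

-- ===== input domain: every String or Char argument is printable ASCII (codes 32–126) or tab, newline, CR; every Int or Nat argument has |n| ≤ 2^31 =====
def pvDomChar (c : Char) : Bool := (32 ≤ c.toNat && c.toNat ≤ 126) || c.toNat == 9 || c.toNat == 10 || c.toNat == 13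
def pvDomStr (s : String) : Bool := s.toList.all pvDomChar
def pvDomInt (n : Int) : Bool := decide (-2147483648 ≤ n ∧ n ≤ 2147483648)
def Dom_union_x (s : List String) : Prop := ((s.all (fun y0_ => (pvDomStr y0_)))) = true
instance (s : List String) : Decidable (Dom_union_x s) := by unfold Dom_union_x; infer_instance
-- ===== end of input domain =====

-- B builds the result column by column (scan all strings per position, break on first
-- mismatch) instead of A's row-major pairwise folds; same cost, no intermediate strings.

-- ===== PORT A =====
-- one loop iteration: 'a == b and a or 'x'' over 1-char strings = (if a = b then a else 'x')
-- (a single char is never falsy, so the and/or idiom is exactly that conditional)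
def unionStep (R : List Char) (a : String) : List Char :=
  if a.toList.length = R.length then
    (a.toList.zip R).map (fun p => if p.1 = p.2 then p.1 else 'x')
  else R  -- AssertionError in Python; such inputs are excluded by Pre_union_x

-- repeated s.pop() consumes the list from the end: the popped-off result is s's last
-- element and the while-loop visits the remaining elements back to front = foldl over reverse
def union_x (s : List String) : String :=
  match s.reverse with
  | [] => ""          -- IndexError in Python (pop from an empty list); excluded by Pre_union_x
  | result :: rest => String.ofList (rest.foldl unionStep result.toList)

-- ===== PORT B =====
-- inner 'for t in s: if t[i] != c: c = 'x'; break'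
def colScan (ts : List String) (i : Nat) (c : Char) : Char :=
  match ts with
  | [] => c
  | t :: ts => if t.toList.getD i ' ' ≠ c then 'x' else colScan ts i c

-- the asserts in Source B only raise (never change a returned value); such inputs are excluded by Pre_union_x
def union_x_alt (s : List String) : String :=
  match s.getLast? with
  | none => ""        -- IndexError in Python; excluded by Pre_union_x
  | some last =>
    let rest := s.dropLast
    let lastL := last.toList
    String.ofList ((List.range lastL.length).map fun i => colScan rest i (lastL.getD i ' '))

-- ===== PRECONDITION & SPEC =====
-- Pre_ excludes exactly the inputs where A raises: the empty list (IndexError from pop)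
-- and lists whose strings do not all have the same length (AssertionError).
def Pre_union_x (s : List String) : Prop :=
  s ≠ [] ∧ ∀ t ∈ s, ∀ u ∈ s, t.toList.length = u.toList.length
instance (s : List String) : Decidable (Pre_union_x s) := by unfold Pre_union_x; infer_instance
def pvWitness_union_x : List String := ["ab", "xb", "ac"]

def Spec_union_x (s : List String) (out : String) : Prop := out = union_x_alt s
instance (s : List String) (out : String) : Decidable (Spec_union_x s out) := by unfold Spec_union_x; infer_instance

-- ===== CLAIM (what is proved, stated in full; the proofs are below) =====
def Claim_equal_union_x : Prop := ∀ (s : List String), Dom_union_x s → Pre_union_x s → Spec_union_x s (union_x s)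

-- ===== LEMMAS AND PROOFS =====

lemma unionStep_length (R : List Char) (a : String) (h : a.toList.length = R.length) :
    (unionStep R a).length = R.length := by
  simp [unionStep, h]

lemma fold_length : ∀ (rest : List String) (R : List Char),
    (∀ t ∈ rest, t.toList.length = R.length) →
    (rest.foldl unionStep R).length = R.length := by
  intro rest
  induction rest with
  | nil => intro R _; simp
  | cons a rest ih =>
    intro R h
    have ha := h a (List.mem_cons_self)
    have hl := unionStep_length R a ha
    rw [List.foldl_cons, ih _ (by intro t ht; rw [hl]; exact h t (List.mem_cons_of_mem _ ht)), hl]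

lemma unionStep_getD (R : List Char) (a : String) (i : Nat) (hi : i < R.length)
    (h : a.toList.length = R.length) :
    (unionStep R a).getD i ' ' =
      if a.toList.getD i ' ' = R.getD i ' ' then a.toList.getD i ' ' else 'x' := by
  have hia : i < a.toList.length := h ▸ hi
  have hiz : i < (a.toList.zip R).length := by rw [List.length_zip]; omega
  simp only [unionStep, h, List.getD_eq_getElem?_getD]
  rw [List.getElem?_eq_getElem (by simpa using hiz), List.getElem?_eq_getElem hia,
      List.getElem?_eq_getElem hi]
  simp [List.getElem_zip]

lemma fold_getD : ∀ (rest : List String) (R : List Char),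
    (∀ t ∈ rest, t.toList.length = R.length) → ∀ i, i < R.length →
    (rest.foldl unionStep R).getD i ' ' =
      if ∀ t ∈ rest, t.toList.getD i ' ' = R.getD i ' ' then R.getD i ' ' else 'x' := by
  intro rest
  induction rest with
  | nil => intro R _ i _; simp
  | cons a rest ih =>
    intro R h i hi
    have ha := h a (List.mem_cons_self)
    have hl := unionStep_length R a ha
    have hrest : ∀ t ∈ rest, t.toList.length = (unionStep R a).length := by
      intro t ht; rw [hl]; exact h t (List.mem_cons_of_mem _ ht)
    rw [List.foldl_cons, ih _ hrest i (hl ▸ hi), unionStep_getD R a i hi ha]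
    simp only [List.forall_mem_cons]
    by_cases h1 : a.toList.getD i ' ' = R.getD i ' '
    · simp only [h1, if_true, true_and]
    · simp only [if_neg h1, ite_self]
      rw [if_neg (fun hc => h1 hc.1)]

lemma colScan_spec (ts : List String) (i : Nat) (c : Char) :
    colScan ts i c = if ∀ t ∈ ts, t.toList.getD i ' ' = c then c else 'x' := by
  induction ts with
  | nil => simp [colScan]
  | cons t ts ih =>
    rw [colScan, ih]
    simp only [List.forall_mem_cons]
    by_cases h : t.toList.getD i ' ' = c
    · rw [if_neg (not_not_intro h)]
      simp only [h, true_and]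
    · rw [if_pos h, if_neg (fun hc => h hc.1)]

-- ===== VERDICT (by name: the statement is the Claim_ definition above) =====
theorem union_x_spec : Claim_equal_union_x := by
  intro s _ ⟨hne, hlen⟩
  unfold Spec_union_x
  obtain ⟨last, init, rfl⟩ : ∃ last init, s = init ++ [last] := by
    rcases List.eq_nil_or_concat s with h | ⟨init, last, h⟩
    · exact absurd h hne
    · exact ⟨last, init, by simpa [List.concat_eq_append] using h⟩
  have hrev : (init ++ [last]).reverse = last :: init.reverse := by simp
  have hlast : (init ++ [last]).getLast? = some last := by
    simp [List.getLast?_append]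
  have hdrop : (init ++ [last]).dropLast = init := by
    simp
  have hmem_last : last ∈ init ++ [last] := by simp
  have hle : ∀ t ∈ init, t.toList.length = last.toList.length := by
    intro t ht; exact hlen t (by simp [ht]) last hmem_last
  have hleR : ∀ t ∈ init.reverse, t.toList.length = last.toList.length := by
    intro t ht; exact hle t (List.mem_reverse.mp ht)
  rw [union_x, union_x_alt, hrev, hlast]
  simp only [hdrop]
  congr 1
  apply List.ext_getElem
  · rw [fold_length _ _ hleR]; simp
  · intro i hi1 hi2
    have hiR : i < last.toList.length := by rw [fold_length _ _ hleR] at hi1; exact hi1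
    rw [← List.getD_eq_getElem _ ' ' hi1, ← List.getD_eq_getElem _ ' ' hi2,
        fold_getD _ _ hleR i hiR]
    have : ((List.range last.toList.length).map
        (fun i => colScan init i (last.toList.getD i ' '))).getD i ' ' =
        colScan init i (last.toList.getD i ' ') := by
      rw [List.getD_eq_getElem _ _ (by simpa using hiR)]
      simp
    rw [this, colScan_spec]
    by_cases hall : ∀ t ∈ init, t.toList.getD i ' ' = last.toList.getD i ' '
    · rw [if_pos hall, if_pos (fun t ht => hall t (List.mem_reverse.mp ht))]
    · rw [if_neg hall, if_neg (fun h => hall (fun t ht => h t (List.mem_reverse.mpr ht)))]
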